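-- pv_equiv track=rewrite | github.com/bd240897/Platformer_of_friends | constants.py | get_map_platform
-- ===== SOURCE A (Python) =====
-- PLATFORM_WIDTH = 32
--
-- PLATFORM_HEIGHT = 32
--
-- def get_map_platform(level):
--     x = y = 0  # координаты
--     num_blok_y = len(level[0])
--     num_blok_x = len(level)
--     level_digit = [[0 for i in range(num_blok_y)] for j in range(num_blok_x)]
--
--     for i, row in enumerate(level):  # вся строка
--         for j, col in enumerate(row):  # каждый символ
--             if col == "-":
--                 level_digit[i][j] = (x,y)
--             else:
--                 level_digit[i][j] = (0, 0)
--             x += PLATFORM_WIDTH  # блоки платформы ставятся на ширине блоков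
--         y += PLATFORM_HEIGHT  # то же самое и с высотой
--         x = 0  # на каждой новой строчке начинаем с нуля
--     return level_digit, num_blok_x, num_blok_y
-- ===== SOURCE B (Python) =====
-- PLATFORM_WIDTH = 32
--
-- PLATFORM_HEIGHT = 32
--
-- def get_map_platform(level):
--     num_blok_y = len(level[0])
--     num_blok_x = len(level)
--     # Flatten the map to one string; each '-' found by str.find is decoded back to its
--     # (row, column) cell by divmod.  The decoding is only meaningful for a rectangular
--     # map, which the length check enforces.
--     flat = "".join(level)
--     if len(flat) != num_blok_x * num_blok_y:
--         raise ValueError("level map must be rectangular")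
--     level_digit = [[(0, 0)] * num_blok_y for _ in range(num_blok_x)]
--     k = flat.find("-")
--     while k != -1:
--         i, j = divmod(k, num_blok_y)
--         level_digit[i][j] = (j * PLATFORM_WIDTH, i * PLATFORM_HEIGHT)
--         k = flat.find("-", k + 1)
--     return level_digit, num_blok_x, num_blok_y
-- ===== Notes on version B (the rewrite author's own statement) =====
-- stated objective: alternative
-- what changed: Instead of a nested cell-by-cell pass with running x/y accumulators, B flattens the map into one string, locates the '-' platforms with a single repeated str.find loop, and decodes each flat index back to its cell and coordinates by divmod, writing only the platform cells into a prefilled (0,0) grid.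
-- outside the precondition, e.g. on get_map_platform(['--', '-']): A returns ([[(0, 0), (32, 0)], [(0, 32), 0]], 2, 2), B raises ValueError; on get_map_platform(['-', '-x']): A raises IndexError, B raises ValueError
import Mathlib
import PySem

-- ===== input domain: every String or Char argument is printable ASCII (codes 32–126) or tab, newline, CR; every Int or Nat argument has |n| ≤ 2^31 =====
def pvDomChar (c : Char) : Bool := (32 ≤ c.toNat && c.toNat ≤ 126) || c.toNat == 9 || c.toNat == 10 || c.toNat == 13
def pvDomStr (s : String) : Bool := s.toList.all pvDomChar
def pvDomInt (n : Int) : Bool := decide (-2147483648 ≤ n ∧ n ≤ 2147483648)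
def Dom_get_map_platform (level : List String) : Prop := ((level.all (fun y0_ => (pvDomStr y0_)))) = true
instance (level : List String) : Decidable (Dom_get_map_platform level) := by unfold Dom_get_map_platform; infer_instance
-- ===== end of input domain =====

-- B replaces A's nested cell-by-cell pass with running x/y accumulators by one str.find
-- loop over the flattened map, decoding each '-' hit to its cell by divmod.

-- ===== PORT A =====
-- level_digit[i][j] = (x,y) / (0,0); Python initializes cells with the int 0, which has no
-- value of the cell type; Pre_ guarantees every cell is overwritten, so the (0,0)
-- placeholder below is exact on Pre_.
def pvInnerStep (i : Nat) (st : List (List (Int × Int)) × Int × Int) (cj : Char × Nat) :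
    List (List (Int × Int)) × Int × Int :=
  let v := if cj.1 = '-' then (st.2.1, st.2.2) else ((0 : Int), (0 : Int))
  (st.1.modify i (fun r => r.set cj.2 v), st.2.1 + 32, st.2.2)

def get_map_platform (level : List String) : (List (List (Int × Int))) × Int × Int :=
  let num_blok_y : Int := (level.headD "").toList.length
  let num_blok_x : Int := level.length
  let init : List (List (Int × Int)) :=
    level.map (fun _ => List.replicate (level.headD "").toList.length ((0 : Int), (0 : Int)))
  let fin := level.zipIdx.foldl
    (fun st p =>
      let st2 := p.1.toList.zipIdx.foldl (pvInnerStep p.2) st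
      (st2.1, (0 : Int), st2.2.2 + 32))
    (init, (0 : Int), (0 : Int))
  (fin.1, num_blok_x, num_blok_y)

-- ===== PORT B =====
-- flat = "".join(level); while k != -1: i, j = divmod(k, num_blok_y);
-- level_digit[i][j] = (j*32, i*32); k = flat.find("-", k+1).
-- fuel (= len(flat)) only makes the loop total: found indices strictly increase and stay
-- below len(flat), so the fuel never runs out on any input.  Inside the loop k = find
-- result ≠ -1, hence k ≥ 0 and i, j ≥ 0 and the .toNat casts are exact; the 'none' arm of
-- divmod? (ZeroDivisionError) is unreachable: num_blok_y = 0 forces flat = "" and k = -1.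
-- Where Python raises ValueError (the rectangularity check fails) the port's value is
-- unconstrained; it returns the empty grid there.
def pvScanFlat (m : Int) (flat : String) (g : List (List (Int × Int))) (k : Int) :
    Nat → List (List (Int × Int))
  | 0 => g
  | fuel + 1 =>
    if k = -1 then g
    else
      match PySem.Int.divmod? k m with
      | none => g
      | some (i, j) =>
        pvScanFlat m flat (g.modify i.toNat (fun r => r.set j.toNat (j * 32, i * 32)))
          (PySem.Str.findFrom flat "-" (k + 1) none) fuel

def get_map_platform_alt (level : List String) : (List (List (Int × Int))) × Int × Int :=
  let num_blok_y : Int := (level.headD "").toList.length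
  let num_blok_x : Int := level.length
  let flat : String := PySem.Str.join "" level
  if (flat.toList.length : Int) ≠ num_blok_x * num_blok_y then ([], num_blok_x, num_blok_y)
  else
    let grid0 : List (List (Int × Int)) :=
      (List.range level.length).map
        (fun _ => List.replicate (level.headD "").toList.length ((0 : Int), (0 : Int)))
    let grid := pvScanFlat num_blok_y flat grid0 (PySem.Str.find flat "-") flat.toList.length
    (grid, num_blok_x, num_blok_y)

-- ===== PRECONDITION & SPEC =====
-- Pre_ excludes the empty level (A raises IndexError on level[0]) and ragged levels: rows
-- longer than the first make A raise IndexError on assignment, and rows shorter than the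
-- first leave the plain int 0 in the grid, which is not a value of the declared cell type.
def Pre_get_map_platform (level : List String) : Prop :=
  level ≠ [] ∧ ∀ s ∈ level, s.toList.length = (level.headD "").toList.length
instance (level : List String) : Decidable (Pre_get_map_platform level) := by
  unfold Pre_get_map_platform; infer_instance

def pvWitness_get_map_platform : List String := ["-x", "x-"]

def Spec_get_map_platform (level : List String) (out : (List (List (Int × Int))) × Int × Int) : Prop := out = get_map_platform_alt level
instance (level : List String) (out : (List (List (Int × Int))) × Int × Int) : Decidable (Spec_get_map_platform level out) := by unfold Spec_get_map_platform; infer_instance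

-- ===== CLAIM (what is proved, stated in full; the proofs are below) =====
def Claim_equal_get_map_platform : Prop := ∀ (level : List String), Dom_get_map_platform level → Pre_get_map_platform level → Spec_get_map_platform level (get_map_platform level)

-- ===== LEMMAS AND PROOFS =====

-- the common closed form both ports are reduced to: cell (i,j) is (32j, 32i) on '-', else (0,0)
def pvCell (i : Nat) (cj : Char × Nat) : Int × Int :=
  if cj.1 = '-' then ((cj.2 : Int) * 32, (i : Int) * 32) else ((0 : Int), (0 : Int))

-- row-level fold A performs on the one row being updated (x accumulator and cell sets)
def pvRowFold (y : Int) (st : List (Int × Int) × Int) (cj : Char × Nat) :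
    List (Int × Int) × Int :=
  (st.1.set cj.2 (if cj.1 = '-' then (st.2, y) else ((0 : Int), (0 : Int))), st.2 + 32)

theorem pv_modify_zero {α : Type} (a : α) (t : List α) (f : α → α) :
    (a :: t).modify 0 f = f a :: t := by
  simp [List.modify]

theorem pv_modify_succ {α : Type} (a : α) (t : List α) (n : Nat) (f : α → α) :
    (a :: t).modify (n + 1) f = a :: t.modify n f := by
  simp [List.modify, List.modifyTailIdx_succ_cons]

theorem pv_modify_modify {α : Type} (l : List α) (i : Nat) (f g : α → α) :
    (l.modify i f).modify i g = l.modify i (fun a => g (f a)) := by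
  induction l generalizing i with
  | nil => simp
  | cons a t ih =>
    cases i with
    | zero => rw [pv_modify_zero, pv_modify_zero, pv_modify_zero]
    | succ n => rw [pv_modify_succ, pv_modify_succ, pv_modify_succ, ih]

theorem pv_modify_append {α : Type} (pre : List α) (a : α) (rest : List α) (f : α → α) :
    (pre ++ a :: rest).modify pre.length f = pre ++ f a :: rest := by
  induction pre with
  | nil => simp
  | cons b t ih =>
    show (b :: (t ++ a :: rest)).modify (t.length + 1) f = b :: (t ++ f a :: rest)
    rw [pv_modify_succ, ih]

theorem pv_set_append {α : Type} (pre : List α) (a : α) (rest : List α) (v : α) :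
    (pre ++ a :: rest).set pre.length v = pre ++ v :: rest := by
  induction pre with
  | nil => simp
  | cons b t ih => simp [ih]

-- ===== A-side reduction to the closed form =====

-- Layer 1: the inner fold only modifies row i, threading x
theorem pv_inner_as_modify (l : List (Char × Nat)) (i : Nat)
    (grid : List (List (Int × Int))) (x y : Int) :
    l.foldl (pvInnerStep i) (grid, x, y)
      = (grid.modify i (fun r => (l.foldl (pvRowFold y) (r, x)).1),
         x + 32 * l.length, y) := by
  induction l generalizing grid x with
  | nil =>
    simp only [List.foldl_nil, List.length_nil, Nat.cast_zero, mul_zero, add_zero]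
    exact congrArg (fun g => (g, x, y)) (List.modify_id i grid).symm
  | cons cj t ih =>
    simp only [List.foldl_cons, pvInnerStep, pvRowFold]
    rw [ih, pv_modify_modify]
    refine Prod.ext rfl (Prod.ext ?_ rfl)
    show x + 32 + 32 * (t.length : Int) = x + 32 * ((cj :: t).length : Int)
    simp only [List.length_cons]
    push_cast
    ring

-- Layer 2: the row fold on a row of matching length writes the closed-form cells
theorem pv_row_target (i : Nat) :
    ∀ (cs : List Char) (pre r : List (Int × Int)), r.length = cs.length →
    ((cs.zipIdx pre.length).foldl (pvRowFold ((i : Int) * 32)) (pre ++ r, 32 * (pre.length : Int))).1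
      = pre ++ (cs.zipIdx pre.length).map (pvCell i) := by
  intro cs
  induction cs with
  | nil =>
    intro pre r hr
    rw [List.length_nil] at hr
    rw [List.eq_nil_of_length_eq_zero hr]
    simp
  | cons c t ih =>
    intro pre r hr
    cases r with
    | nil => simp at hr
    | cons a r' =>
      simp only [List.zipIdx_cons, List.foldl_cons, List.map_cons]
      have hstep : pvRowFold ((i : Int) * 32) (pre ++ a :: r', 32 * (pre.length : Int)) (c, pre.length)
          = (pre ++ (if c = '-' then (32 * (pre.length : Int), (i : Int) * 32) else ((0:Int),(0:Int))) :: r',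
             32 * (pre.length : Int) + 32) := by
        simp only [pvRowFold]
        rw [pv_set_append]
      rw [hstep]
      have hr' : r'.length = t.length := by simpa using hr
      have hval : pre ++ (if c = '-' then (32 * (pre.length : Int), (i : Int) * 32) else ((0:Int),(0:Int))) :: r'
          = (pre ++ [(if c = '-' then (32 * (pre.length : Int), (i : Int) * 32) else ((0:Int),(0:Int)))]) ++ r' := by
        simp
      have hx : 32 * (pre.length : Int) + 32
          = 32 * (((pre ++ [(if c = '-' then (32 * (pre.length : Int), (i : Int) * 32) else ((0:Int),(0:Int)))]).length : Nat) : Int) := by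
        simp; ring
      have hk : pre.length + 1
          = (pre ++ [(if c = '-' then (32 * (pre.length : Int), (i : Int) * 32) else ((0:Int),(0:Int)))]).length := by
        simp
      rw [hval, hx, hk, ih _ r' hr']
      simp only [List.append_assoc, List.singleton_append, List.length_append,
        List.length_singleton]
      congr 1
      congr 1
      by_cases hc : c = '-' <;> simp [hc, pvCell, mul_comm]

-- Layer 3: the outer fold over rows builds the closed-form grid row by row
theorem pv_outer (n : Nat) :
    ∀ (rows : List String) (preG : List (List (Int × Int))),
    (∀ s ∈ rows, s.toList.length = n) →
    (rows.zipIdx preG.length).foldl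
      (fun st p =>
        let st2 := p.1.toList.zipIdx.foldl (pvInnerStep p.2) st
        (st2.1, (0 : Int), st2.2.2 + 32))
      (preG ++ List.replicate rows.length (List.replicate n ((0:Int),(0:Int))), (0 : Int),
        32 * (preG.length : Int))
      = (preG ++ (rows.zipIdx preG.length).map (fun p => p.1.toList.zipIdx.map (pvCell p.2)),
         (0 : Int), 32 * ((preG.length : Int) + rows.length)) := by
  intro rows
  induction rows with
  | nil =>
    intro preG _
    simp
  | cons srow rest ih =>
    intro preG hall
    simp only [List.zipIdx_cons, List.foldl_cons, List.map_cons, List.length_cons,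
      List.replicate_succ]
    rw [pv_inner_as_modify]
    rw [pv_modify_append]
    have hrowlen : (List.replicate n ((0:Int),(0:Int)) : List (Int × Int)).length
        = srow.toList.length := by
      simp [hall srow (by simp)]
    have hrow := pv_row_target preG.length srow.toList []
      (List.replicate n ((0:Int),(0:Int))) hrowlen
    have hy0 : ((preG.length : Nat) : Int) * 32 = 32 * (preG.length : Int) := by ring
    rw [hy0] at hrow
    simp only [List.length_nil, Nat.cast_zero, mul_zero, List.nil_append] at hrow
    rw [hrow]
    have happ : preG ++ (srow.toList.zipIdx.map (pvCell preG.length))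
            :: List.replicate rest.length (List.replicate n ((0:Int),(0:Int)))
        = (preG ++ [srow.toList.zipIdx.map (pvCell preG.length)])
            ++ List.replicate rest.length (List.replicate n ((0:Int),(0:Int))) := by
      simp
    have hk1 : preG.length + 1
        = (preG ++ [srow.toList.zipIdx.map (pvCell preG.length)]).length := by
      simp
    have hy : 32 * (preG.length : Int) + 32
        = 32 * (((preG ++ [srow.toList.zipIdx.map (pvCell preG.length)]).length : Nat) : Int) := by
      simp; ring
    rw [happ, hk1, hy, ih _ (fun s hs => hall s (by simp [hs]))]
    simp only [List.append_assoc, List.singleton_append, List.length_append,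
      List.length_singleton]
    congr 2
    push_cast
    ring

-- ===== B-side reduction to the closed form =====

-- a generic walk over the characters of a string, applying a write at each '-' index
def pvWalk {α : Type} (w : Nat → α → α) : List Char → Nat → α → α
  | [], _, g => g
  | c :: cs, k, g => pvWalk w cs (k + 1) (if c = '-' then w k g else g)

-- the write the flat scan performs at flat index k: decode (i, j) = divmod k m, set the cell
def pvFlatWrite (m : Int) (k : Nat) (g : List (List (Int × Int))) : List (List (Int × Int)) :=
  match PySem.Int.divmod? (k : Int) m with
  | none => g
  | some (i, j) => g.modify i.toNat (fun r => r.set j.toNat (j * 32, i * 32))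

-- what the find loop does to row i of the grid, walked character by character
def pvMarks (i : Nat) : List Char → Nat → List (Int × Int) → List (Int × Int)
  | [], _, r => r
  | c :: cs, k, r =>
    pvMarks i cs (k + 1) (if c = '-' then r.set k ((k : Int) * 32, (i : Int) * 32) else r)

theorem pvWalk_no_dash {α : Type} (w : Nat → α → α) :
    ∀ (cs : List Char) (k : Nat) (g : α),
      (∀ c ∈ cs, c ≠ '-') → pvWalk w cs k g = g := by
  intro cs
  induction cs with
  | nil => intro k g _; rfl
  | cons c t ih =>
    intro k g h
    simp only [pvWalk, h c (by simp)]
    exact ih (k + 1) g (fun c' hc' => h c' (by simp [hc']))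

-- skip a dash-free segment: pvWalk over drop k equals pvWalk over drop (k+d)
theorem pvWalk_skip {α : Type} (w : Nat → α → α) (row : List Char) :
    ∀ (d k : Nat) (g : α), k + d ≤ row.length →
      (∀ idx, k ≤ idx → idx < k + d → row[idx]? ≠ some '-') →
      pvWalk w (row.drop k) k g = pvWalk w (row.drop (k + d)) (k + d) g := by
  intro d
  induction d with
  | zero => intro k g _ _; rfl
  | succ d ih =>
    intro k g hle hno
    have hk : k < row.length := by omega
    have hdrop : row.drop k = row[k] :: row.drop (k + 1) := List.drop_eq_getElem_cons hk
    have hck : row[k] ≠ '-' := by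
      have := hno k (le_refl k) (by omega)
      simpa [List.getElem?_eq_getElem hk] using this
    rw [hdrop]
    simp only [pvWalk, if_neg hck]
    have hx : k + (d + 1) = (k + 1) + d := by omega
    rw [hx]
    exact ih (k + 1) g (by omega) (fun idx h1 h2 => hno idx (by omega) (by omega))

theorem pvWalk_id {α : Type} (w : Nat → α → α) (hw : ∀ k g, w k g = g) :
    ∀ (cs : List Char) (k : Nat) (g : α), pvWalk w cs k g = g := by
  intro cs
  induction cs with
  | nil => intro k g; rfl
  | cons c t ih =>
    intro k g
    simp only [pvWalk, hw, ite_self]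
    exact ih (k + 1) g

theorem pvWalk_append {α : Type} (w : Nat → α → α) :
    ∀ (l1 l2 : List Char) (k : Nat) (g : α),
      pvWalk w (l1 ++ l2) k g = pvWalk w l2 (k + l1.length) (pvWalk w l1 k g) := by
  intro l1
  induction l1 with
  | nil => intro l2 k g; simp [pvWalk]
  | cons c t ih =>
    intro l2 k g
    simp only [List.cons_append, pvWalk, ih, List.length_cons]
    congr 1
    omega

-- single-char prefix of a drop = the character at that index
theorem pv_prefix_drop_iff (row : List Char) (j : Nat) :
    (['-'] <+: row.drop j) ↔ row[j]? = some '-' := by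
  constructor
  · rintro ⟨t, ht⟩
    have hj : j < row.length := by
      by_contra h
      rw [List.drop_eq_nil_of_le (by omega)] at ht
      simp at ht
    rw [List.drop_eq_getElem_cons hj] at ht
    simp only [List.singleton_append, List.cons.injEq] at ht
    rw [List.getElem?_eq_getElem hj, ← ht.1]
  · intro h
    have hj : j < row.length := by
      by_contra hc
      rw [List.getElem?_eq_none (by omega)] at h
      simp at h
    rw [List.getElem?_eq_getElem hj] at h
    refine ⟨row.drop (j + 1), ?_⟩
    rw [List.drop_eq_getElem_cons hj, Option.some.inj h]
    rfl

-- the flat find loop = pvWalk with the divmod write on the remaining suffix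
theorem pvScanFlat_walk (m : Nat) (flat : String) :
    ∀ (fuel k : Nat) (g : List (List (Int × Int))), k ≤ flat.toList.length →
      flat.toList.length - k ≤ fuel →
      pvScanFlat (m : Int) flat g (PySem.Chars.findFrom flat.toList ['-'] (k : Int) none) fuel
        = pvWalk (pvFlatWrite (m : Int)) (flat.toList.drop k) k g := by
  intro fuel
  induction fuel with
  | zero =>
    intro k g hk hf
    have hkl : k = flat.toList.length := by omega
    subst hkl
    rw [List.drop_length]
    rfl
  | succ fuel ih =>
    intro k g hk hf
    by_cases hneg : PySem.Chars.findFrom flat.toList ['-'] (k : Int) none = -1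
    · -- no '-' left: loop exits, the walk writes nothing
      have hno : ¬ (['-'] <:+: flat.toList.drop k) :=
        (PySem.Chars.findFrom_natCast_eq_neg_one_iff flat.toList ['-'] k hk).mp hneg
      have hnone : ∀ c ∈ flat.toList.drop k, c ≠ '-' := by
        intro c hc hcc
        subst hcc
        obtain ⟨s, t, hst⟩ := List.append_of_mem hc
        exact hno ⟨s, t, by simp [hst]⟩
      rw [hneg]
      simp only [pvScanFlat, reduceIte]
      exact (pvWalk_no_dash _ _ k g hnone).symm
    · -- '-' found at flat index j: one write, continue from j+1
      obtain ⟨hkj, hpre, hmin⟩ :=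
        PySem.Chars.findFrom_natCast_spec flat.toList ['-'] k hk hneg
      set j : Int := PySem.Chars.findFrom flat.toList ['-'] (k : Int) none with hj
      have hj0 : (0 : Int) ≤ j := le_trans (by exact_mod_cast Int.natCast_nonneg k) hkj
      have hjchar : flat.toList[j.toNat]? = some '-' := (pv_prefix_drop_iff _ _).mp hpre
      have hjlt : j.toNat < flat.toList.length := by
        by_contra h
        rw [List.getElem?_eq_none (by omega)] at hjchar
        simp at hjchar
      have hkj' : k ≤ j.toNat := by omega
      have hjj : ((j.toNat : Nat) : Int) = j := Int.toNat_of_nonneg hj0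
      simp only [pvScanFlat, if_neg hneg]
      have hcast : j + 1 = ((j.toNat + 1 : Nat) : Int) := by omega
      rw [hcast]
      have hfind : PySem.Str.findFrom flat "-" ((j.toNat + 1 : Nat) : Int) none
          = PySem.Chars.findFrom flat.toList ['-'] ((j.toNat + 1 : Nat) : Int) none := by
        simp
      split
      next hdm =>
        -- divmod(k, 0) raises only when m = 0, and then every pvFlatWrite is the identity
        have hm0 : (m : Int) = 0 := by
          by_contra hm
          simp [PySem.Int.divmod?] at hdm
          exact hm (by exact_mod_cast hdm)
        have hid : ∀ (k' : Nat) (g' : List (List (Int × Int))), pvFlatWrite (m : Int) k' g' = g' := by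
          intro k' g'
          simp [pvFlatWrite, hm0, PySem.Int.divmod?]
        exact (pvWalk_id _ hid _ _ _).symm
      next i jj hdm =>
        rw [hfind,
          ih (j.toNat + 1) (g.modify i.toNat (fun r => r.set jj.toNat (jj * 32, i * 32)))
            (by omega) (by omega)]
        have hw : pvFlatWrite (m : Int) j.toNat g
            = g.modify i.toNat (fun r => r.set jj.toNat (jj * 32, i * 32)) := by
          rw [pvFlatWrite, hjj, hdm]
        have hnoseg : ∀ idx, k ≤ idx → idx < k + (j.toNat - k) → flat.toList[idx]? ≠ some '-' := by
          intro idx h1 h2 hch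
          exact hmin idx h1 (by omega) ((pv_prefix_drop_iff _ _).mpr hch)
        rw [pvWalk_skip (pvFlatWrite (m : Int)) flat.toList (j.toNat - k) k g (by omega) hnoseg]
        have hkd : k + (j.toNat - k) = j.toNat := by omega
        rw [hkd, List.drop_eq_getElem_cons hjlt]
        have hc : flat.toList[j.toNat] = '-' := by
          simpa [List.getElem?_eq_getElem hjlt] using hjchar
        simp only [pvWalk, hc, reduceIte]
        rw [hw]

-- pvMarks on a fresh (0,0) row yields the closed-form cells
theorem pvMarks_closed (i : Nat) :
    ∀ (cs : List Char) (pre : List (Int × Int)),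
      pvMarks i cs pre.length (pre ++ List.replicate cs.length ((0:Int),(0:Int)))
        = pre ++ (cs.zipIdx pre.length).map (pvCell i) := by
  intro cs
  induction cs with
  | nil => intro pre; simp [pvMarks]
  | cons c t ih =>
    intro pre
    simp only [List.length_cons, List.replicate_succ, List.zipIdx_cons, List.map_cons, pvMarks]
    have hset : (if c = '-' then
          (pre ++ ((0:Int),(0:Int)) :: List.replicate t.length ((0:Int),(0:Int))).set pre.length
            (((pre.length : Nat) : Int) * 32, (i : Int) * 32)
        else pre ++ ((0:Int),(0:Int)) :: List.replicate t.length ((0:Int),(0:Int)))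
        = (pre ++ [pvCell i (c, pre.length)]) ++ List.replicate t.length ((0:Int),(0:Int)) := by
      by_cases hc : c = '-'
      · rw [if_pos hc, pv_set_append]
        simp [pvCell, hc]
      · rw [if_neg hc]
        simp [pvCell, hc]
    rw [hset]
    have hk : pre.length + 1 = (pre ++ [pvCell i (c, pre.length)]).length := by simp
    rw [hk, ih (pre ++ [pvCell i (c, pre.length)])]
    simp

-- the divmod write at flat index m*i0 + t (t < m) writes cell (i0, t)
theorem pvFlatWrite_eval (m i0 t : Nat) (ht : t < m) (g : List (List (Int × Int))) :
    pvFlatWrite (m : Int) (m * i0 + t) g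
      = g.modify i0 (fun r => r.set t ((t : Int) * 32, (i0 : Int) * 32)) := by
  have hm : (m : Int) ≠ 0 := by
    intro h
    have : m = 0 := by exact_mod_cast h
    omega
  have hdiv : (m * i0 + t) / m = i0 := by
    rw [Nat.mul_add_div (by omega), Nat.div_eq_of_lt ht]
    omega
  have hmod : (m * i0 + t) % m = t := by
    rw [Nat.mul_add_mod]
    exact Nat.mod_eq_of_lt ht
  simp only [pvFlatWrite, PySem.Int.divmod?, if_neg hm, ← Int.ofNat_fdiv, ← Int.ofNat_fmod,
    hdiv, hmod, Int.toNat_natCast]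

-- the walk over one row's characters, starting at flat offset m*i0, edits only row i0
theorem pvWalk_row (m i0 : Nat) :
    ∀ (cs : List Char) (t : Nat) (g : List (List (Int × Int))), t + cs.length ≤ m →
      pvWalk (pvFlatWrite (m : Int)) cs (m * i0 + t) g
        = g.modify i0 (fun r => pvMarks i0 cs t r) := by
  intro cs
  induction cs with
  | nil =>
    intro t g _
    simp only [pvWalk, pvMarks]
    exact (List.modify_id i0 g).symm
  | cons c t' ih =>
    intro t g hle
    simp only [pvWalk, pvMarks]
    have ht : t < m := by
      have := hle
      simp only [List.length_cons] at this
      omega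
    have hstep : (if c = '-' then pvFlatWrite (m : Int) (m * i0 + t) g else g)
        = g.modify i0 (fun r =>
            if c = '-' then r.set t ((t : Int) * 32, (i0 : Int) * 32) else r) := by
      by_cases hc : c = '-'
      · rw [if_pos hc, pvFlatWrite_eval m i0 t ht g]
        simp [hc]
      · rw [if_neg hc]
        simp only [hc, if_false]
        exact (List.modify_id i0 g).symm
    rw [hstep]
    have hidx : m * i0 + t + 1 = m * i0 + (t + 1) := by omega
    rw [hidx, ih (t + 1) _ (by simp at hle ⊢; omega), pv_modify_modify]

-- the walk over the flattened rectangular map builds the closed-form grid row by row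
theorem pvWalk_outer (m : Nat) :
    ∀ (rows : List String) (preG : List (List (Int × Int))),
    (∀ s ∈ rows, s.toList.length = m) →
    pvWalk (pvFlatWrite (m : Int)) ((rows.map String.toList).flatten) (m * preG.length)
      (preG ++ List.replicate rows.length (List.replicate m ((0:Int),(0:Int))))
      = preG ++ (rows.zipIdx preG.length).map (fun p => p.1.toList.zipIdx.map (pvCell p.2)) := by
  intro rows
  induction rows with
  | nil => intro preG _; simp [pvWalk]
  | cons srow rest ih =>
    intro preG hall
    simp only [List.map_cons, List.flatten_cons, List.zipIdx_cons, List.length_cons,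
      List.replicate_succ, List.map_cons]
    rw [pvWalk_append]
    have hlen : srow.toList.length = m := hall srow (by simp)
    have hrow := pvWalk_row m preG.length srow.toList 0
      (preG ++ List.replicate m ((0:Int),(0:Int))
        :: List.replicate rest.length (List.replicate m ((0:Int),(0:Int)))) (by omega)
    rw [show m * preG.length + 0 = m * preG.length by omega] at hrow
    rw [hrow, pv_modify_append]
    have hmarks : pvMarks preG.length srow.toList 0 (List.replicate m ((0:Int),(0:Int)))
        = srow.toList.zipIdx.map (pvCell preG.length) := by
      have := pvMarks_closed preG.length srow.toList []
      simpa [hlen] using this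
    rw [hmarks]
    have happ : preG ++ (srow.toList.zipIdx.map (pvCell preG.length))
            :: List.replicate rest.length (List.replicate m ((0:Int),(0:Int)))
        = (preG ++ [srow.toList.zipIdx.map (pvCell preG.length)])
            ++ List.replicate rest.length (List.replicate m ((0:Int),(0:Int))) := by
      simp
    have hoff : m * preG.length + srow.toList.length
        = m * (preG ++ [srow.toList.zipIdx.map (pvCell preG.length)]).length := by
      simp [hlen]; ring
    have hk1 : preG.length + 1
        = (preG ++ [srow.toList.zipIdx.map (pvCell preG.length)]).length := by simp
    rw [happ, hoff, hk1, ih _ (fun s hs => hall s (by simp [hs]))]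
    simp

-- "".join(level) flattens to the concatenation of the rows' characters
theorem pv_join_toList : ∀ (parts : List String),
    (PySem.Str.join "" parts).toList = (parts.map String.toList).flatten := by
  intro parts
  induction parts with
  | nil => simp [PySem.Chars.join_nil]
  | cons a t ih =>
    cases t with
    | nil => simp [PySem.Chars.join_singleton]
    | cons b t' =>
      simp only [PySem.Str.toList_join, List.map_cons] at ih ⊢
      rw [PySem.Chars.join_cons_cons]
      have ih' : PySem.Chars.join [] (b.toList :: List.map String.toList t')
          = b.toList ++ (List.map String.toList t').flatten := by simpa using ih
      simp [ih']

theorem pv_flatten_len (m : Nat) : ∀ (rows : List String),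
    (∀ s ∈ rows, s.toList.length = m) →
    (rows.map String.toList).flatten.length = rows.length * m := by
  intro rows
  induction rows with
  | nil => intro _; simp
  | cons a t ih =>
    intro hall
    simp only [List.map_cons, List.flatten_cons, List.length_append, List.length_cons]
    rw [hall a (by simp), ih (fun s hs => hall s (by simp [hs]))]
    ring

-- ===== VERDICT (by name: the statement is the Claim_ definition above) =====
theorem get_map_platform_spec : Claim_equal_get_map_platform := by
  intro level _ hpre
  obtain ⟨hne, hlen⟩ := hpre
  unfold Spec_get_map_platform get_map_platform get_map_platform_alt
  simp only []
  set m : Nat := (level.headD "").toList.length with hm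
  have hflat : (PySem.Str.join "" level).toList = (level.map String.toList).flatten :=
    pv_join_toList level
  have hflen : (PySem.Str.join "" level).toList.length = level.length * m := by
    rw [hflat]; exact pv_flatten_len m level hlen
  have hguard : ¬ (((PySem.Str.join "" level).toList.length : Int)
      ≠ (level.length : Int) * (m : Int)) := by
    intro hne2
    exact hne2 (by rw [hflen]; push_cast; ring)
  rw [if_neg hguard]
  -- A side: reduce to the closed form
  have hmap : level.map (fun _ => List.replicate m ((0:Int),(0:Int)))
      = List.replicate level.length (List.replicate m ((0:Int),(0:Int))) :=
    List.map_const'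
  have hA := pv_outer m level [] hlen
  simp only [List.length_nil, Nat.cast_zero, mul_zero, List.nil_append, zero_add] at hA
  rw [hmap, hA]
  -- B side: reduce the flat scan to the same closed form
  have hmap2 : (List.range level.length).map (fun _ => List.replicate m ((0:Int),(0:Int)))
      = List.replicate level.length (List.replicate m ((0:Int),(0:Int))) := by
    rw [List.map_const', List.length_range]
  rw [hmap2]
  have hfind0 : PySem.Str.find (PySem.Str.join "" level) "-"
      = PySem.Chars.findFrom (PySem.Str.join "" level).toList ['-'] ((0 : Nat) : Int) none := by
    simp
  rw [hfind0, pvScanFlat_walk m (PySem.Str.join "" level) _ 0 _ (by omega) (by omega)]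
  rw [List.drop_zero, hflat]
  have hB := pvWalk_outer m level [] hlen
  simp only [List.length_nil, Nat.mul_zero, List.nil_append] at hB
  rw [hB]
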